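-- pv_equiv track=rewrite | github.com/UniversidadDePalermo/python | src/x99_vectors/main.py | make_vector_c
-- ===== SOURCE A (Python) =====
-- def get_max_value_pos(vec):
--   '''
--   Obtiene el índice del elemento de mayor valor en el vector
--   '''
--   max = vec[0]
--   max_pos = 0
--
--   for idx in range(len(vec)):
--     if vec[idx] > max:
--       max = vec[idx]
--       max_pos = idx
--
--   return max_pos
--
-- def make_vector_c(vec):
--   '''
--   Crea el vector C.
--
--   El vector C solo contiene elementos del vector dado, cuyo valor es menor
--   al elemento de mayor valor en el vector dado.
--
--   Nota: Solo se toman los valores hasta el índice del valor mayor, dado que en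
--   el enunciado se muestra: `[12, 40, 14, 28, 50, 56]` que no contiene los
--   valores: `[12, 40, 14, 28, 50, 56, 16, 20, 36]`
--   '''
--   vec_c = []
--   max_value_pos = get_max_value_pos(vec)
--   max_val = vec[max_value_pos]
--
--   for idx in range(len(vec)):
--     if vec[idx] < max_val and idx <= max_value_pos:
--       vec_c.append(vec[idx])
--
--   return vec_c
-- ===== SOURCE B (Python) =====
-- def make_vector_c(vec):
--     # Find the position of the FIRST maximum (vec[0] first, so empty input
--     # still raises IndexError like A), then return the prefix before it:
--     # every element before the first maximum is strictly smaller than it.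
--     max_val = vec[0]
--     max_pos = 0
--     for idx, v in enumerate(vec):
--         if v > max_val:
--             max_val = v
--             max_pos = idx
--     return vec[:max_pos]
-- ===== Notes on version B (the rewrite author's own statement) =====
-- stated objective: simpler
-- what changed: B keeps the first-maximum scan but replaces A's second conditional-accumulation loop with the closed-form prefix slice vec[:max_pos], since every element before the first maximum is strictly below it.
import Mathlib
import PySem

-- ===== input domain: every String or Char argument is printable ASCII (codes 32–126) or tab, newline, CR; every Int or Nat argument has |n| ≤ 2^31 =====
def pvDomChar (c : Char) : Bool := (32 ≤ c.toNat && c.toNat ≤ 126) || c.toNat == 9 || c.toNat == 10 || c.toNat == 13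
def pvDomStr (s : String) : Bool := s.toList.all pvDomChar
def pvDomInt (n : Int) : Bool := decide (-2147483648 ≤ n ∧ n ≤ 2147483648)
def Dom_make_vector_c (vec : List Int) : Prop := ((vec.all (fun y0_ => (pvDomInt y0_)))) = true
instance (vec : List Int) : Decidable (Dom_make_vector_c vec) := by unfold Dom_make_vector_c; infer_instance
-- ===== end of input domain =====

-- B replaces A's second conditional-accumulation loop with the closed-form prefix slice vec[:max_pos] (simpler).


-- ===== PORT A =====
-- get_max_value_pos: vec[0] raises IndexError on empty vec (none branch; excluded by Pre_).
def get_max_value_pos (vec : List Int) : Option Int :=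
  match PySem.List.pyGet? vec 0 with
  | none => none
  | some m0 =>
    some (((PySem.List.pyRange 0 (vec.length : Int) 1).foldl
      (fun (st : Int × Int) idx =>
        if PySem.List.pyGetD vec idx 0 > st.1 then (PySem.List.pyGetD vec idx 0, idx) else st)
      (m0, 0)).2)

def make_vector_c (vec : List Int) : List Int :=
  match get_max_value_pos vec with
  | none => []  -- unreachable under Pre_ (IndexError in Python)
  | some max_value_pos =>
    let max_val := PySem.List.pyGetD vec max_value_pos 0
    (PySem.List.pyRange 0 (vec.length : Int) 1).foldl
      (fun acc idx =>
        if PySem.List.pyGetD vec idx 0 < max_val ∧ idx ≤ max_value_pos then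
          acc ++ [PySem.List.pyGetD vec idx 0]
        else acc)
      []

-- ===== PORT B =====
def make_vector_c_alt (vec : List Int) : List Int :=
  match vec with
  | [] => []  -- vec[0] raises IndexError in Python; excluded by Pre_
  | v0 :: _ =>
    let st := (PySem.List.enumerate vec 0).foldl
      (fun (st : Int × Int) q => if q.2 > st.1 then (q.2, q.1) else st) (v0, 0)
    PySem.List.slice vec none (some st.2)

-- ===== PRECONDITION & SPEC =====
def Pre_make_vector_c (vec : List Int) : Prop := vec ≠ []
instance (vec : List Int) : Decidable (Pre_make_vector_c vec) := by unfold Pre_make_vector_c; infer_instance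
def pvWitness_make_vector_c : List Int := [1, 2]
def Spec_make_vector_c (vec : List Int) (out : List Int) : Prop := out = make_vector_c_alt vec
instance (vec : List Int) (out : List Int) : Decidable (Spec_make_vector_c vec out) := by unfold Spec_make_vector_c; infer_instance

-- ===== CLAIM (what is proved, stated in full; the proofs are below) =====
def Claim_equal_make_vector_c : Prop := ∀ (vec : List Int), Dom_make_vector_c vec → Pre_make_vector_c vec → Spec_make_vector_c vec (make_vector_c vec)

-- ===== LEMMAS AND PROOFS =====

-- Index-loop 'for idx in range(len(vec))' over vec equals a fold over enumerate of the suffix.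
lemma pv_fold_idx {σ : Type} (vec : List Int) (g : σ → Int → Int → σ) :
    ∀ (l : List Int) (k : Nat) (st : σ), vec.drop k = l →
    (PySem.List.pyRange (k : Int) (vec.length : Int) 1).foldl
      (fun st idx => g st idx (PySem.List.pyGetD vec idx 0)) st
    = (PySem.List.enumerate l (k : Int)).foldl (fun st q => g st q.1 q.2) st := by
  intro l
  induction l with
  | nil =>
      intro k st h
      have hk : vec.length ≤ k := by
        have := congrArg List.length h; simp at this; omega
      rw [PySem.List.pyRange_one_eq_nil (by exact_mod_cast hk)]
      simp [PySem.List.enumerate]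
  | cons a l' ih =>
      intro k st h
      have hk : k < vec.length := by
        have := congrArg List.length h; simp at this; omega
      have ha : vec[k] = a := by
        have : (vec.drop k)[0]'(by simp [h]) = a := by simp [h]
        simpa [List.getElem_drop] using this
      have hget : PySem.List.pyGetD vec (k : Int) 0 = a := by
        rw [PySem.List.pyGetD_natCast]
        simp [hk, ha]
      rw [PySem.List.pyRange_one_cons (by exact_mod_cast hk)]
      rw [PySem.List.enumerate_cons]
      simp only [List.foldl_cons, hget]
      have hdrop : vec.drop (k + 1) = l' := by
        have h1 : (vec.drop k).tail = l' := by rw [h]; rfl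
        rwa [List.tail_drop] at h1
      have := ih (k + 1) (g st (k : Int) a) hdrop
      rw [show ((k : Int) + 1) = ((k + 1 : Nat) : Int) by push_cast; ring]
      exact this

-- The invariant established by the first-maximum scan.
def pvGood (vec : List Int) (st : Int × Int) : Prop :=
  0 ≤ st.2 ∧ st.2.toNat < vec.length ∧ vec.getD st.2.toNat 0 = st.1 ∧
    (∀ j < st.2.toNat, vec.getD j 0 < st.1)

lemma pv_scan_good (vec : List Int) :
    ∀ (l : List Int) (k : Nat) (st : Int × Int), vec.drop k = l →
    pvGood vec st → (∀ j < k, vec.getD j 0 ≤ st.1) →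
    pvGood vec ((PySem.List.enumerate l (k : Int)).foldl
        (fun (st : Int × Int) q => if q.2 > st.1 then (q.2, q.1) else st) st) ∧
    (∀ j < vec.length, vec.getD j 0 ≤
      ((PySem.List.enumerate l (k : Int)).foldl
        (fun (st : Int × Int) q => if q.2 > st.1 then (q.2, q.1) else st) st).1) := by
  intro l
  induction l with
  | nil =>
      intro k st h hg hb
      have hk : vec.length ≤ k := by
        have := congrArg List.length h; simp at this; omega
      simp only [PySem.List.enumerate, List.foldl_nil]
      exact ⟨hg, fun j hj => hb j (by omega)⟩
  | cons a l' ih =>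
      intro k st h hg hb
      have hk : k < vec.length := by
        have := congrArg List.length h; simp at this; omega
      have ha : vec.getD k 0 = a := by
        have : (vec.drop k)[0]'(by simp [h]) = a := by simp [h]
        have h2 : vec[k] = a := by simpa [List.getElem_drop] using this
        simp [hk, h2]
      have hdrop : vec.drop (k + 1) = l' := by
        have h1 : (vec.drop k).tail = l' := by rw [h]; rfl
        rwa [List.tail_drop] at h1
      rw [PySem.List.enumerate_cons]
      simp only [List.foldl_cons]
      rw [show ((k : Int) + 1) = ((k + 1 : Nat) : Int) by push_cast; ring]
      by_cases hc : a > st.1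
      · rw [if_pos hc]
        refine ih (k + 1) ((a, (k : Int))) hdrop ?_ ?_
        · refine ⟨Int.natCast_nonneg k, ?_, ?_, ?_⟩
          · show ((k : Int)).toNat < vec.length
            simpa using hk
          · show vec.getD ((k : Int)).toNat 0 = a
            simpa using ha
          · intro j hj
            have hjk : j < k := by simpa using hj
            exact lt_of_le_of_lt (hb j hjk) hc
        · intro j hj
          have hj' : j ≤ k := by omega
          rcases lt_or_eq_of_le hj' with h1 | h1
          · exact le_of_lt (lt_of_le_of_lt (hb j h1) hc)
          · subst h1
            show vec.getD j 0 ≤ a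
            rw [ha]
      · rw [if_neg hc]
        refine ih (k + 1) st hdrop hg ?_
        intro j hj
        have hj' : j ≤ k := by omega
        rcases lt_or_eq_of_le hj' with h1 | h1
        · exact hb j h1
        · subst h1; rw [ha]; omega

-- The conditional-accumulation loop produces exactly the prefix before the first maximum.
lemma pv_filter_take (vec : List Int) (m p : Int) (hp : 0 ≤ p)
    (_hlen : p.toNat < vec.length)
    (hatp : vec.getD p.toNat 0 = m)
    (hlt : ∀ j < p.toNat, vec.getD j 0 < m) :
    ∀ (l : List Int) (k : Nat) (acc : List Int), vec.drop k = l →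
    (PySem.List.enumerate l (k : Int)).foldl
      (fun acc (q : Int × Int) => if q.2 < m ∧ q.1 ≤ p then acc ++ [q.2] else acc) acc
    = acc ++ (vec.take p.toNat).drop k := by
  intro l
  induction l with
  | nil =>
      intro k acc h
      have hk : vec.length ≤ k := by
        have := congrArg List.length h; simp at this; omega
      rw [List.drop_eq_nil_of_le (by simp; omega)]
      simp [PySem.List.enumerate]
  | cons a l' ih =>
      intro k acc h
      have hk : k < vec.length := by
        have := congrArg List.length h; simp at this; omega
      have hak : vec[k] = a := by
        have : (vec.drop k)[0]'(by simp [h]) = a := by simp [h]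
        simpa [List.getElem_drop] using this
      have ha : vec.getD k 0 = a := by simp [hk, hak]
      have hdrop : vec.drop (k + 1) = l' := by
        have h1 : (vec.drop k).tail = l' := by rw [h]; rfl
        rwa [List.tail_drop] at h1
      rw [PySem.List.enumerate_cons]
      simp only [List.foldl_cons]
      rw [show ((k : Int) + 1) = ((k + 1 : Nat) : Int) by push_cast; ring]
      rcases lt_trichotomy k p.toNat with hkp | hkp | hkp
      · have hcond : a < m ∧ (k : Int) ≤ p := by
          refine ⟨by rw [← ha]; exact hlt k hkp, by omega⟩
        rw [if_pos hcond, ih (k + 1) (acc ++ [a]) hdrop]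
        have hstep : (vec.take p.toNat).drop k = a :: (vec.take p.toNat).drop (k + 1) := by
          rw [List.drop_eq_getElem_cons (by simp; omega)]
          congr 1
          simp [List.getElem_take, hak]
        rw [hstep, List.append_assoc]
        rfl
      · have hcond : ¬ (a < m ∧ (k : Int) ≤ p) := by
          rintro ⟨h1, _⟩
          rw [← ha] at h1
          subst hkp
          rw [hatp] at h1
          exact lt_irrefl m h1
        rw [if_neg hcond, ih (k + 1) acc hdrop]
        have e1 : (vec.take p.toNat).drop (k + 1) = [] := List.drop_eq_nil_of_le (by simp; omega)
        have e2 : (vec.take p.toNat).drop k = [] := List.drop_eq_nil_of_le (by simp; omega)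
        rw [e1, e2]
      · have hcond : ¬ (a < m ∧ (k : Int) ≤ p) := by
          rintro ⟨_, h2⟩; omega
        rw [if_neg hcond, ih (k + 1) acc hdrop]
        have e1 : (vec.take p.toNat).drop (k + 1) = [] := List.drop_eq_nil_of_le (by simp; omega)
        have e2 : (vec.take p.toNat).drop k = [] := List.drop_eq_nil_of_le (by simp; omega)
        rw [e1, e2]

lemma pv_loop1 (vec : List Int) (st0 : Int × Int) :
    (PySem.List.pyRange 0 (vec.length : Int) 1).foldl
      (fun (st : Int × Int) idx =>
        if PySem.List.pyGetD vec idx 0 > st.1 then (PySem.List.pyGetD vec idx 0, idx) else st) st0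
    = (PySem.List.enumerate vec 0).foldl
      (fun (st : Int × Int) q => if q.2 > st.1 then (q.2, q.1) else st) st0 := by
  have h := pv_fold_idx vec (fun st idx v => if v > st.1 then (v, idx) else st) vec 0 st0 rfl
  simpa using h

lemma pv_loop2 (vec : List Int) (m p : Int) :
    (PySem.List.pyRange 0 (vec.length : Int) 1).foldl
      (fun (acc : List Int) idx =>
        if PySem.List.pyGetD vec idx 0 < m ∧ idx ≤ p then acc ++ [PySem.List.pyGetD vec idx 0] else acc) []
    = (PySem.List.enumerate vec 0).foldl
      (fun (acc : List Int) (q : Int × Int) => if q.2 < m ∧ q.1 ≤ p then acc ++ [q.2] else acc) [] := by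
  have h := pv_fold_idx vec
    (fun (acc : List Int) idx v => if v < m ∧ idx ≤ p then acc ++ [v] else acc) vec 0 [] rfl
  simpa using h

-- ===== VERDICT (by name: the statement is the Claim_ definition above) =====
theorem make_vector_c_spec : Claim_equal_make_vector_c := by
  intro vec _ hpre
  unfold Spec_make_vector_c
  match vec, hpre with
  | v0 :: rest, _ =>
    have hginit : pvGood (v0 :: rest) (v0, 0) := by
      unfold pvGood
      refine ⟨le_refl 0, by simp, by simp, ?_⟩
      intro j hj; omega
    obtain ⟨hgoodM, hallM⟩ := pv_scan_good (v0 :: rest) (v0 :: rest) 0 (v0, 0) rfl hginit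
      (fun j hj => by omega)
    unfold pvGood at hgoodM
    set M := (PySem.List.enumerate (v0 :: rest) ((0 : Nat) : Int)).foldl
      (fun (st : Int × Int) q => if q.2 > st.1 then (q.2, q.1) else st) (v0, 0) with hM
    obtain ⟨hp0, hplen, hpat, hplt⟩ := hgoodM
    have hget0 : PySem.List.pyGet? (v0 :: rest) 0 = some v0 := by
      simp [PySem.List.pyGet?, PySem.List.pyIdx?]
    unfold make_vector_c get_max_value_pos make_vector_c_alt
    rw [hget0]
    dsimp only
    rw [pv_loop1 (v0 :: rest) (v0, 0)]
    have hMcast : (PySem.List.enumerate (v0 :: rest) (0 : Int)).foldl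
        (fun (st : Int × Int) q => if q.2 > st.1 then (q.2, q.1) else st) (v0, 0) = M := by
      rw [hM]; norm_num
    rw [hMcast]
    -- A's max_val is vec[M.2] = M.1
    have hmv : PySem.List.pyGetD (v0 :: rest) M.2 0 = M.1 := by
      rw [show M.2 = ((M.2.toNat : Nat) : Int) by omega, PySem.List.pyGetD_natCast]
      exact hpat
    rw [pv_loop2 (v0 :: rest) (PySem.List.pyGetD (v0 :: rest) M.2 0) M.2, hmv]
    have hft := pv_filter_take (v0 :: rest) M.1 M.2 hp0 hplen hpat hplt (v0 :: rest) 0 [] rfl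
    rw [Nat.cast_zero] at hft
    simp only [List.nil_append, List.drop_zero] at hft
    rw [hft, PySem.List.slice_to (b := M.2) (hb := hp0)]
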